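-- pv_equiv track=rewrite | github.com/alphagov/notifications-admin | app/main/views/templates.py | _get_template_copy_name
-- ===== SOURCE A (Python) =====
-- def _get_template_copy_name(template, existing_templates):
--     template_names = [existing["name"] for existing in existing_templates]
--
--     for index in reversed(range(1, 10)):
--         if f"{template['name']} (copy {index})" in template_names:
--             return f"{template['name']} (copy {index + 1})"
--
--     if f"{template['name']} (copy)" in template_names:
--         return f"{template['name']} (copy 2)"
--
--     return f"{template['name']} (copy)"
-- ===== SOURCE B (Python) =====
-- def _get_template_copy_name(template, existing_templates):
--     base = template["name"]
--     n = len(base)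
--     best = 0
--     bare = False
--     for existing in existing_templates:
--         s = existing["name"]
--         if not s.startswith(base):
--             continue
--         rest = s[n:]
--         if rest == " (copy)":
--             bare = True
--         elif (
--             len(rest) == 9
--             and rest[:7] == " (copy "
--             and rest[8] == ")"
--             and "1" <= rest[7] <= "9"
--         ):
--             best = max(best, int(rest[7]))
--     if best:
--         return f"{base} (copy {best + 1})"
--     if bare:
--         return f"{base} (copy 2)"
--     return f"{base} (copy)"
-- ===== Notes on version B (the rewrite author's own statement) =====
-- stated objective: faster
-- what changed: Instead of generating 10 candidate strings and testing each for membership in the list of existing names (10 scans), B makes one pass over the existing names, classifying each name by prefix/suffix shape and tracking the maximum copy index and a bare-copy flag.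
import Mathlib
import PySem

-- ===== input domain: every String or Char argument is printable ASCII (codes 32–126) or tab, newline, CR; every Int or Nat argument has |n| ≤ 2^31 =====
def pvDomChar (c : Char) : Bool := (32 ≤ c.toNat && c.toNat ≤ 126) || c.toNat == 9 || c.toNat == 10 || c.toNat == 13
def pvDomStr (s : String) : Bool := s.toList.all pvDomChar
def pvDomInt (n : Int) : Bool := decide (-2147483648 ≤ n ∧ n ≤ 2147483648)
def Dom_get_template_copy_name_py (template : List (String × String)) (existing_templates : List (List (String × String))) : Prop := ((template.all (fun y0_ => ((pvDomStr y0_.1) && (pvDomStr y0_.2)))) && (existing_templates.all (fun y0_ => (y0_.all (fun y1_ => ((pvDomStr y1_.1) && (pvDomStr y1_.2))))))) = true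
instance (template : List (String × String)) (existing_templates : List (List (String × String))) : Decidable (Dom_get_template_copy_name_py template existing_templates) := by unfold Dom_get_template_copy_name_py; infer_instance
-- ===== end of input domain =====

-- B replaces A's ten candidate-membership scans by a single pass over the existing
-- names that classifies each name and tracks the maximum copy index seen.

-- ===== PORT A =====
-- the loop 'for index in reversed(range(1, 10)): if … in template_names: return …'
-- followed by the two fallthrough returns
def pvALoop (name : String) (template_names : List String) : List Int → String
  | [] =>
      if (name ++ " (copy)") ∈ template_names then name ++ " (copy 2)"
      else name ++ " (copy)"
  | i :: rest =>
      if (name ++ " (copy " ++ PySem.Int.toStr i ++ ")") ∈ template_names then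
        name ++ " (copy " ++ PySem.Int.toStr (i + 1) ++ ")"
      else pvALoop name template_names rest

def get_template_copy_name_py (template : List (String × String)) (existing_templates : List (List (String × String))) : String :=
  -- template['name'] / existing['name']: first-match lookup; KeyError (key absent) is excluded by Pre_
  let name := (template.lookup "name").getD ""
  let template_names := existing_templates.map (fun existing => (existing.lookup "name").getD "")
  pvALoop name template_names (PySem.List.pyRange 1 10 1).reverse

-- ===== PORT B =====
-- one loop iteration of Source B: startswith = isPrefixOf, rest = s[n:] = drop n,
-- rest[:7]/rest[7]/rest[8] = take 7 / getD 7 / getD 8, int(rest[7]) = toNat - 48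
def pvAltStep (base : List Char) (acc : Int × Bool) (s : String) : Int × Bool :=
  let t := s.toList
  if base.isPrefixOf t then
    let rest := t.drop base.length
    if rest = " (copy)".toList then (acc.1, true)
    else if rest.length = 9 ∧ rest.take 7 = " (copy ".toList ∧ rest.getD 8 ' ' = ')'
            ∧ '1' ≤ rest.getD 7 ' ' ∧ rest.getD 7 ' ' ≤ '9' then
      (max acc.1 ((rest.getD 7 ' ').toNat - 48 : Int), acc.2)
    else acc
  else acc

def get_template_copy_name_py_alt (template : List (String × String)) (existing_templates : List (List (String × String))) : String :=
  let base := (template.lookup "name").getD ""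
  let r := existing_templates.foldl
    (fun acc existing => pvAltStep base.toList acc ((existing.lookup "name").getD "")) (0, false)
  if r.1 ≠ 0 then base ++ " (copy " ++ PySem.Int.toStr (r.1 + 1) ++ ")"
  else if r.2 then base ++ " (copy 2)"
  else base ++ " (copy)"

-- ===== PRECONDITION & SPEC =====
-- A raises KeyError iff template or some existing template lacks the key "name"
def Pre_get_template_copy_name_py (template : List (String × String)) (existing_templates : List (List (String × String))) : Prop :=
  (template.lookup "name").isSome = true ∧
  ∀ existing ∈ existing_templates, (existing.lookup "name").isSome = true
instance (template : List (String × String)) (existing_templates : List (List (String × String))) : Decidable (Pre_get_template_copy_name_py template existing_templates) := by unfold Pre_get_template_copy_name_py; infer_instance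

def pvWitness_get_template_copy_name_py : (List (String × String)) × (List (List (String × String))) :=
  ([("name", "two weeks")], [[("name", "two weeks (copy)")], [("name", "two weeks (copy 3)")]])

def Spec_get_template_copy_name_py (template : List (String × String)) (existing_templates : List (List (String × String))) (out : String) : Prop := out = get_template_copy_name_py_alt template existing_templates
instance (template : List (String × String)) (existing_templates : List (List (String × String))) (out : String) : Decidable (Spec_get_template_copy_name_py template existing_templates out) := by unfold Spec_get_template_copy_name_py; infer_instance

-- ===== CLAIM (what is proved, stated in full; the proofs are below) =====
def Claim_equal_get_template_copy_name_py : Prop := ∀ (template : List (String × String)) (existing_templates : List (List (String × String))), Dom_get_template_copy_name_py template existing_templates → Pre_get_template_copy_name_py template existing_templates → Spec_get_template_copy_name_py template existing_templates (get_template_copy_name_py template existing_templates)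

-- ===== LEMMAS AND PROOFS =====

-- the two shapes of names B reacts to
def pvBare (name : String) : String := name ++ " (copy)"
def pvCand (name : String) (c : Char) : String := name ++ String.ofList [' ', '(', 'c', 'o', 'p', 'y', ' ', c, ')']

theorem pvStr_ext_iff (s t : String) : s = t ↔ s.toList = t.toList :=
  ⟨fun h => by rw [h], fun h => String.ext h⟩

theorem pvBare_toList (name : String) : (pvBare name).toList = name.toList ++ [' ', '(', 'c', 'o', 'p', 'y', ')'] := by
  simp [pvBare]

theorem pvCand_toList (name : String) (c : Char) : (pvCand name c).toList = name.toList ++ [' ', '(', 'c', 'o', 'p', 'y', ' ', c, ')'] := by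
  simp [pvCand]

-- decompose "t is base followed by r" into isPrefixOf + drop
theorem pvDecomp (b t r : List Char) :
    (t = b ++ r) ↔ (b.isPrefixOf t ∧ t.drop b.length = r) := by
  constructor
  · rintro rfl
    refine ⟨?_, by simp⟩
    simp [List.isPrefixOf_iff_prefix]
  · rintro ⟨hp, rfl⟩
    rw [List.isPrefixOf_iff_prefix] at hp
    obtain ⟨u, rfl⟩ := hp
    simp

-- reconstruct the 9-character rest from B's tests
theorem pvRest9 (r : List Char) (h9 : r.length = 9) (h7 : r.take 7 = " (copy ".toList)
    (h8 : r.getD 8 ' ' = ')') : r = [' ', '(', 'c', 'o', 'p', 'y', ' ', r.getD 7 ' ', ')'] := by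
  rcases r with _ | ⟨a0, _ | ⟨a1, _ | ⟨a2, _ | ⟨a3, _ | ⟨a4, _ | ⟨a5, _ | ⟨a6, _ | ⟨a7, _ | ⟨a8, tl⟩⟩⟩⟩⟩⟩⟩⟩⟩ <;>
    simp only [List.length] at h9 <;> try omega
  obtain rfl : tl = [] := by
    have : tl.length = 0 := by omega
    exact List.eq_nil_of_length_eq_zero this
  simp [String.toList] at h7 h8 ⊢
  have hs : (String.Internal.toArray " (copy ").toList = [' ','(','c','o','p','y',' '] := by decide
  rw [hs] at h7
  simp_all

theorem pvCopy7 : (" (copy ").toList = [' ', '(', 'c', 'o', 'p', 'y', ' '] := by decide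

theorem pvChar_eq_of_toNat (c d : Char) (h : c.toNat = d.toNat) : c = d := by
  rw [← Char.ofNat_toNat c, ← Char.ofNat_toNat d, h]

theorem pvDigit_ge (c : Char) (h : '1' ≤ c) : 49 ≤ c.toNat := by
  rw [Char.le_def, UInt32.le_iff_toNat_le] at h; exact h

theorem pvDigit_le (c : Char) (h : c ≤ '9') : c.toNat ≤ 57 := by
  rw [Char.le_def, UInt32.le_iff_toNat_le] at h; exact h

-- full behaviour of one step of B's loop
theorem pvStep_spec (name s : String) (acc : Int × Bool) :
    ((pvAltStep name.toList acc s).2 = (acc.2 || decide (s = pvBare name)))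
    ∧ acc.1 ≤ (pvAltStep name.toList acc s).1
    ∧ (∀ c, '1' ≤ c → c ≤ '9' → s = pvCand name c → ((c.toNat : Int) - 48) ≤ (pvAltStep name.toList acc s).1)
    ∧ ((pvAltStep name.toList acc s).1 = acc.1
        ∨ ∃ c, '1' ≤ c ∧ c ≤ '9' ∧ s = pvCand name c ∧ (pvAltStep name.toList acc s).1 = (c.toNat : Int) - 48) := by
  unfold pvAltStep
  dsimp only
  split_ifs with hp hbare hdig
  · -- bare branch: s = pvBare name
    have hs : s = pvBare name := by
      rw [pvStr_ext_iff, pvBare_toList, pvDecomp]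
      exact ⟨hp, by simpa using hbare⟩
    refine ⟨by simp [hs], le_refl _, ?_, Or.inl rfl⟩
    intro c _ _ hc
    exfalso
    rw [hs, pvStr_ext_iff, pvBare_toList, pvCand_toList] at hc
    have := congrArg List.length hc
    simp at this
  · -- digit branch
    obtain ⟨h9, h7, h8, hc1, hc9⟩ := hdig
    set c := (s.toList.drop name.toList.length).getD 7 ' ' with hcdef
    have hrest : s.toList.drop name.toList.length = [' ', '(', 'c', 'o', 'p', 'y', ' ', c, ')'] :=
      pvRest9 _ h9 h7 h8
    have hs : s = pvCand name c := by
      rw [pvStr_ext_iff, pvCand_toList, pvDecomp]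
      exact ⟨hp, hrest⟩
    have hne : s ≠ pvBare name := by
      intro h
      rw [h, pvStr_ext_iff, pvBare_toList, pvCand_toList] at hs
      have := congrArg List.length hs
      simp at this
    have hinj : ∀ c', s = pvCand name c' → c' = c := by
      intro c' h'
      rw [hs, pvStr_ext_iff, pvCand_toList, pvCand_toList] at h'
      simpa using (List.append_cancel_left h').symm
    refine ⟨by simp [hne], le_max_left _ _, ?_, ?_⟩
    · intro c' _ _ h'
      rw [hinj c' h']
      exact le_trans (le_max_right _ _) (le_refl _)
    · rcases le_total ((c.toNat : Int) - 48) acc.1 with h | h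
      · exact Or.inl (max_eq_left h)
      · exact Or.inr ⟨c, hc1, hc9, hs, max_eq_right h⟩
  · -- prefix holds but neither shape
    have hnb : s ≠ pvBare name := by
      intro h
      apply hbare
      rw [h, pvBare_toList] at hp ⊢
      have : (name.toList ++ [' ', '(', 'c', 'o', 'p', 'y', ')']).drop name.toList.length = [' ', '(', 'c', 'o', 'p', 'y', ')'] := by simp
      simpa [pvBare_toList] using this
    refine ⟨by simp [hnb], le_refl _, ?_, Or.inl rfl⟩
    intro c h1 h9 hc
    exfalso
    apply hdig
    have hdrop : s.toList.drop name.toList.length = [' ', '(', 'c', 'o', 'p', 'y', ' ', c, ')'] := by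
      rw [hc, pvCand_toList]; simp
    rw [hdrop]
    exact ⟨by simp, by simp [pvCopy7], by simp, by simpa using h1, by simpa using h9⟩
  · -- prefix fails: s is neither shape
    have hnb : s ≠ pvBare name := by
      intro h
      apply hp
      rw [h, pvBare_toList, List.isPrefixOf_iff_prefix]
      exact ⟨_, rfl⟩
    refine ⟨by simp [hnb], le_refl _, ?_, Or.inl rfl⟩
    intro c _ _ hc
    exfalso
    apply hp
    rw [hc, pvCand_toList, List.isPrefixOf_iff_prefix]
    exact ⟨_, rfl⟩

-- full behaviour of B's fold
theorem pvFold_spec (name : String) (l : List String) (acc : Int × Bool) :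
    ((l.foldl (pvAltStep name.toList) acc).2 = (acc.2 || decide (pvBare name ∈ l)))
    ∧ acc.1 ≤ (l.foldl (pvAltStep name.toList) acc).1
    ∧ (∀ c, '1' ≤ c → c ≤ '9' → pvCand name c ∈ l → ((c.toNat : Int) - 48) ≤ (l.foldl (pvAltStep name.toList) acc).1)
    ∧ ((l.foldl (pvAltStep name.toList) acc).1 = acc.1
        ∨ ∃ c, '1' ≤ c ∧ c ≤ '9' ∧ pvCand name c ∈ l ∧ (l.foldl (pvAltStep name.toList) acc).1 = (c.toNat : Int) - 48) := by
  induction l generalizing acc with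
  | nil => simp
  | cons s tl ih =>
    obtain ⟨s2, sle, sall, sdis⟩ := pvStep_spec name s acc
    obtain ⟨t2, tle, tall, tdis⟩ := ih (pvAltStep name.toList acc s)
    refine ⟨?_, le_trans sle tle, ?_, ?_⟩
    · rw [List.foldl_cons, t2, s2]
      by_cases h : s = pvBare name
      · simp [h, List.mem_cons]
      · have h' : pvBare name ≠ s := fun e => h e.symm
        simp [h, h', List.mem_cons]
    · intro c h1 h9 hm
      rcases List.mem_cons.mp hm with h | h
      · exact le_trans (sall c h1 h9 h.symm) tle
      · exact tall c h1 h9 h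
    · rw [List.foldl_cons] at *
      rcases tdis with h | ⟨c, h1, h9, hm, he⟩
      · rcases sdis with h' | ⟨c, h1, h9, hs, he⟩
        · exact Or.inl (h.trans h')
        · exact Or.inr ⟨c, h1, h9, List.mem_cons.mpr (Or.inl hs.symm), h.trans he⟩
      · exact Or.inr ⟨c, h1, h9, List.mem_cons.mpr (Or.inr hm), he⟩

-- A's candidate strings are the pvCand strings
theorem pvCandA (name : String) (i : Int) (c : Char) (h : PySem.Int.toStr i = String.ofList [c]) :
    name ++ " (copy " ++ PySem.Int.toStr i ++ ")" = pvCand name c := by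
  rw [pvStr_ext_iff, pvCand_toList, h]
  simp

theorem get_template_copy_name_py_spec : Claim_equal_get_template_copy_name_py := by
  intro template existing_templates _ _
  unfold Spec_get_template_copy_name_py get_template_copy_name_py get_template_copy_name_py_alt
  dsimp only
  set name := (template.lookup "name").getD "" with hname
  have hfold : existing_templates.foldl
      (fun acc existing => pvAltStep name.toList acc ((existing.lookup "name").getD "")) (0, false)
      = (existing_templates.map (fun existing => (existing.lookup "name").getD "")).foldl
          (pvAltStep name.toList) (0, false) := by
    rw [List.foldl_map]
  rw [hfold]
  set names := existing_templates.map (fun existing => (existing.lookup "name").getD "") with hnames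
  obtain ⟨h2, hle, hall, hdis⟩ := pvFold_spec name names (0, false)
  set r := names.foldl (pvAltStep name.toList) (0, false) with hr
  have hrange : PySem.List.pyRange 1 10 1 = [1, 2, 3, 4, 5, 6, 7, 8, 9] := by decide
  -- membership facts about A's candidates, phrased via pvCand
  have c1 := pvCandA name 1 '1' (by decide)
  have c2 := pvCandA name 2 '2' (by decide)
  have c3 := pvCandA name 3 '3' (by decide)
  have c4 := pvCandA name 4 '4' (by decide)
  have c5 := pvCandA name 5 '5' (by decide)
  have c6 := pvCandA name 6 '6' (by decide)
  have c7 := pvCandA name 7 '7' (by decide)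
  have c8 := pvCandA name 8 '8' (by decide)
  have c9 := pvCandA name 9 '9' (by decide)
  have hnotmem : ∀ c : Char, '1' ≤ c → c ≤ '9' → r.1 < (c.toNat : Int) - 48 → pvCand name c ∉ names := by
    intro c h1 h9 hlt hm
    exact absurd (hall c h1 h9 hm) (not_le.mpr hlt)
  have hub : r.1 ≤ 9 := by
    rcases hdis with h | ⟨c, _, h9, _, he⟩
    · omega
    · have := pvDigit_le c h9; omega
  have hlb : 0 ≤ r.1 := hle
  -- the value r.1, if nonzero, is witnessed by a candidate in names
  have hwit : r.1 ≠ 0 → ∃ c, '1' ≤ c ∧ c ≤ '9' ∧ pvCand name c ∈ names ∧ r.1 = (c.toNat : Int) - 48 := by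
    intro hne
    rcases hdis with h | h
    · exact absurd h hne
    · exact h
  rw [hrange]
  -- identify the digit char from r.1 when r.1 = m ≥ 1
  have hdigchar : ∀ (m : Int), r.1 = m → 1 ≤ m → m ≤ 9 →
      pvCand name (Char.ofNat (48 + m.toNat)) ∈ names := by
    intro m hm h1 h9
    obtain ⟨c, hc1, hc9, hmem, he⟩ := hwit (by omega)
    have hge := pvDigit_ge c hc1
    have hle' := pvDigit_le c hc9
    have : c = Char.ofNat (48 + m.toNat) := by
      apply pvChar_eq_of_toNat
      have : c.toNat = 48 + m.toNat := by omega
      rw [this]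
      interval_cases m <;> decide
    rwa [this] at hmem
  interval_cases hm : r.1
  · -- r.1 = 0: no numbered copy present; compare the bare branches
    simp only [List.reverse_cons, List.reverse_nil, List.nil_append, List.cons_append, pvALoop,
      c1, c2, c3, c4, c5, c6, c7, c8, c9]
    rw [if_neg (hnotmem '9' (by decide) (by decide) (by decide)),
        if_neg (hnotmem '8' (by decide) (by decide) (by decide)),
        if_neg (hnotmem '7' (by decide) (by decide) (by decide)),
        if_neg (hnotmem '6' (by decide) (by decide) (by decide)),
        if_neg (hnotmem '5' (by decide) (by decide) (by decide)),
        if_neg (hnotmem '4' (by decide) (by decide) (by decide)),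
        if_neg (hnotmem '3' (by decide) (by decide) (by decide)),
        if_neg (hnotmem '2' (by decide) (by decide) (by decide)),
        if_neg (hnotmem '1' (by decide) (by decide) (by decide))]
    by_cases hb : pvBare name ∈ names
    · rw [if_pos (by simpa [pvBare] using hb)]
      have hb2 : r.2 = true := by rw [h2]; simp [hb]
      simp [hb2]
    · rw [if_neg (by simpa [pvBare] using hb)]
      have hb2 : r.2 = false := by rw [h2]; simp [hb]
      simp [hb2]
  · -- r.1 = 1
    have hmem := hdigchar 1 rfl (by decide) (by decide)
    have hch : Char.ofNat (48 + (1 : Int).toNat) = '1' := by decide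
    rw [hch] at hmem
    simp only [List.reverse_cons, List.reverse_nil, List.nil_append, List.cons_append, pvALoop,
      c1, c2, c3, c4, c5, c6, c7, c8, c9]
    rw [if_neg (hnotmem '9' (by decide) (by decide) (by decide)),
        if_neg (hnotmem '8' (by decide) (by decide) (by decide)),
        if_neg (hnotmem '7' (by decide) (by decide) (by decide)),
        if_neg (hnotmem '6' (by decide) (by decide) (by decide)),
        if_neg (hnotmem '5' (by decide) (by decide) (by decide)),
        if_neg (hnotmem '4' (by decide) (by decide) (by decide)),
        if_neg (hnotmem '3' (by decide) (by decide) (by decide)),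
        if_neg (hnotmem '2' (by decide) (by decide) (by decide)),
        if_pos hmem]
    norm_num
  · -- r.1 = 2
    have hmem := hdigchar 2 rfl (by decide) (by decide)
    have hch : Char.ofNat (48 + (2 : Int).toNat) = '2' := by decide
    rw [hch] at hmem
    simp only [List.reverse_cons, List.reverse_nil, List.nil_append, List.cons_append, pvALoop,
      c1, c2, c3, c4, c5, c6, c7, c8, c9]
    rw [if_neg (hnotmem '9' (by decide) (by decide) (by decide)),
        if_neg (hnotmem '8' (by decide) (by decide) (by decide)),
        if_neg (hnotmem '7' (by decide) (by decide) (by decide)),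
        if_neg (hnotmem '6' (by decide) (by decide) (by decide)),
        if_neg (hnotmem '5' (by decide) (by decide) (by decide)),
        if_neg (hnotmem '4' (by decide) (by decide) (by decide)),
        if_neg (hnotmem '3' (by decide) (by decide) (by decide)),
        if_pos hmem]
    norm_num
  · -- r.1 = 3
    have hmem := hdigchar 3 rfl (by decide) (by decide)
    have hch : Char.ofNat (48 + (3 : Int).toNat) = '3' := by decide
    rw [hch] at hmem
    simp only [List.reverse_cons, List.reverse_nil, List.nil_append, List.cons_append, pvALoop,
      c1, c2, c3, c4, c5, c6, c7, c8, c9]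
    rw [if_neg (hnotmem '9' (by decide) (by decide) (by decide)),
        if_neg (hnotmem '8' (by decide) (by decide) (by decide)),
        if_neg (hnotmem '7' (by decide) (by decide) (by decide)),
        if_neg (hnotmem '6' (by decide) (by decide) (by decide)),
        if_neg (hnotmem '5' (by decide) (by decide) (by decide)),
        if_neg (hnotmem '4' (by decide) (by decide) (by decide)),
        if_pos hmem]
    norm_num
  · -- r.1 = 4
    have hmem := hdigchar 4 rfl (by decide) (by decide)
    have hch : Char.ofNat (48 + (4 : Int).toNat) = '4' := by decide
    rw [hch] at hmem
    simp only [List.reverse_cons, List.reverse_nil, List.nil_append, List.cons_append, pvALoop,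
      c1, c2, c3, c4, c5, c6, c7, c8, c9]
    rw [if_neg (hnotmem '9' (by decide) (by decide) (by decide)),
        if_neg (hnotmem '8' (by decide) (by decide) (by decide)),
        if_neg (hnotmem '7' (by decide) (by decide) (by decide)),
        if_neg (hnotmem '6' (by decide) (by decide) (by decide)),
        if_neg (hnotmem '5' (by decide) (by decide) (by decide)),
        if_pos hmem]
    norm_num
  · -- r.1 = 5
    have hmem := hdigchar 5 rfl (by decide) (by decide)
    have hch : Char.ofNat (48 + (5 : Int).toNat) = '5' := by decide
    rw [hch] at hmem
    simp only [List.reverse_cons, List.reverse_nil, List.nil_append, List.cons_append, pvALoop,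
      c1, c2, c3, c4, c5, c6, c7, c8, c9]
    rw [if_neg (hnotmem '9' (by decide) (by decide) (by decide)),
        if_neg (hnotmem '8' (by decide) (by decide) (by decide)),
        if_neg (hnotmem '7' (by decide) (by decide) (by decide)),
        if_neg (hnotmem '6' (by decide) (by decide) (by decide)),
        if_pos hmem]
    norm_num
  · -- r.1 = 6
    have hmem := hdigchar 6 rfl (by decide) (by decide)
    have hch : Char.ofNat (48 + (6 : Int).toNat) = '6' := by decide
    rw [hch] at hmem
    simp only [List.reverse_cons, List.reverse_nil, List.nil_append, List.cons_append, pvALoop,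
      c1, c2, c3, c4, c5, c6, c7, c8, c9]
    rw [if_neg (hnotmem '9' (by decide) (by decide) (by decide)),
        if_neg (hnotmem '8' (by decide) (by decide) (by decide)),
        if_neg (hnotmem '7' (by decide) (by decide) (by decide)),
        if_pos hmem]
    norm_num
  · -- r.1 = 7
    have hmem := hdigchar 7 rfl (by decide) (by decide)
    have hch : Char.ofNat (48 + (7 : Int).toNat) = '7' := by decide
    rw [hch] at hmem
    simp only [List.reverse_cons, List.reverse_nil, List.nil_append, List.cons_append, pvALoop,
      c1, c2, c3, c4, c5, c6, c7, c8, c9]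
    rw [if_neg (hnotmem '9' (by decide) (by decide) (by decide)),
        if_neg (hnotmem '8' (by decide) (by decide) (by decide)),
        if_pos hmem]
    norm_num
  · -- r.1 = 8
    have hmem := hdigchar 8 rfl (by decide) (by decide)
    have hch : Char.ofNat (48 + (8 : Int).toNat) = '8' := by decide
    rw [hch] at hmem
    simp only [List.reverse_cons, List.reverse_nil, List.nil_append, List.cons_append, pvALoop,
      c1, c2, c3, c4, c5, c6, c7, c8, c9]
    rw [if_neg (hnotmem '9' (by decide) (by decide) (by decide)),
        if_pos hmem]
    norm_num
  · -- r.1 = 9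
    have hmem := hdigchar 9 rfl (by decide) (by decide)
    have hch : Char.ofNat (48 + (9 : Int).toNat) = '9' := by decide
    rw [hch] at hmem
    simp only [List.reverse_cons, List.reverse_nil, List.nil_append, List.cons_append, pvALoop,
      c1, c2, c3, c4, c5, c6, c7, c8, c9]
    rw [if_pos hmem]
    norm_num
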